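-- pv_equiv track=rewrite | github.com/MissKessa/fi-2022 | Python/Python VI. Problem 18.py | count_votes
-- ===== SOURCE A (Python) =====
-- def count_votes(p):
--     """Counts the votes of each partie.
--     -1 == invalid
--     0 == blank
--     1 == valid """
--     invalid=0
--     blank=0
--     valid=0
--     for i in p:
--         if i==-1:
--             invalid+=1
--         elif i==0:
--             blank+=1
--         else:
--             valid+=1
--     return invalid,blank,valid
-- ===== SOURCE B (Python) =====
-- def count_votes(p):
--     """Counts the votes of each partie.
--     -1 == invalid
--     0 == blank
--     1 == valid """
--     invalid = p.count(-1)
--     blank = p.count(0)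
--     return invalid, blank, len(p) - invalid - blank
-- ===== Notes on version B (the rewrite author's own statement) =====
-- stated objective: idiomatic
-- what changed: Replaces the single pass with if/elif/else branching and three accumulators by staged whole-list passes: p.count(-1) and p.count(0) with no branching or loop state, deriving valid as len(p) minus the two.
import Mathlib
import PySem

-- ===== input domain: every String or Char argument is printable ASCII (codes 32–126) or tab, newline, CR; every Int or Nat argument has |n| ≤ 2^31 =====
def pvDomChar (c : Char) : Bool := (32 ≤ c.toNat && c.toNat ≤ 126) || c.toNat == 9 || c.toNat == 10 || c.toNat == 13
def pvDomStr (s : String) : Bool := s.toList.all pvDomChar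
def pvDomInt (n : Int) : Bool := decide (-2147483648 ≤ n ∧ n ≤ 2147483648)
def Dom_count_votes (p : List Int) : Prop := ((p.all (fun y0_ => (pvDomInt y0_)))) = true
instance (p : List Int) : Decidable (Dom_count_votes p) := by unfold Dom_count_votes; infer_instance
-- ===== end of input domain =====

-- B replaces A's single branching loop with three accumulators by staged whole-list count passes (p.count(-1), p.count(0)) and valid = len(p) minus the two (idiomatic; same cost).


-- ===== PORT A =====
-- A: element-by-element loop with three accumulators and if/elif/else branching.
def count_votes (p : List Int) : Int × Int × Int :=
  p.foldl
    (fun (s : Int × Int × Int) i =>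
      if i = -1 then (s.1 + 1, s.2.1, s.2.2)
      else if i = 0 then (s.1, s.2.1 + 1, s.2.2)
      else (s.1, s.2.1, s.2.2 + 1))
    (0, 0, 0)

-- ===== PORT B =====
-- B: invalid = p.count(-1), blank = p.count(0), valid = len(p) - invalid - blank.
def count_votes_alt (p : List Int) : Int × Int × Int :=
  let invalid : Int := PySem.List.count p (-1)
  let blank : Int := PySem.List.count p 0
  (invalid, blank, (p.length : Int) - invalid - blank)

-- ===== PRECONDITION & SPEC =====
def Spec_count_votes (p : List Int) (out : Int × Int × Int) : Prop := out = count_votes_alt p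
instance (p : List Int) (out : Int × Int × Int) : Decidable (Spec_count_votes p out) := by unfold Spec_count_votes; infer_instance

-- ===== CLAIM =====
def Claim_equal_count_votes : Prop := ∀ (p : List Int), Dom_count_votes p → Spec_count_votes p (count_votes p)

-- ===== LEMMAS AND PROOFS =====
-- Loop invariant for A's fold: each accumulator is its start plus the respective count.
theorem count_votes_foldl (p : List Int) (s : Int × Int × Int) :
    p.foldl
      (fun (s : Int × Int × Int) i =>
        if i = -1 then (s.1 + 1, s.2.1, s.2.2)
        else if i = 0 then (s.1, s.2.1 + 1, s.2.2)
        else (s.1, s.2.1, s.2.2 + 1))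
      s
    = (s.1 + (p.count (-1) : Int), s.2.1 + (p.count 0 : Int),
       s.2.2 + ((p.length : Int) - (p.count (-1) : Int) - (p.count 0 : Int))) := by
  induction p generalizing s with
  | nil => simp
  | cons a t ih =>
    simp only [List.foldl_cons, List.count_cons, List.length_cons]
    by_cases h1 : a = -1
    · subst h1; simp [ih]; omega
    · by_cases h0 : a = 0
      · subst h0; simp [ih, h1]; omega
      · simp [ih, h1, h0]; omega

-- ===== VERDICT =====
theorem count_votes_spec : Claim_equal_count_votes := by
  intro p _
  show count_votes p = count_votes_alt p
  simp [count_votes, count_votes_alt, count_votes_foldl, PySem.List.count_eq]
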